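-- pv_equiv track=rewrite | github.com/muhammadabdulhaseeb075/BGMS-Frontend | BGMS/BGMS/utils.py | sort_list_by_score
-- ===== SOURCE A (Python) =====
-- def sort_list_by_score(searched_list, key_list):
--     """Returns list with accumulate scores for the same person from the fuzzy search between two fuzzy results"""
--     # sorting the combined list by person id
--
--     def sort_key(result):
--         return_key = []
--         for key in key_list:
--             return_key.append(result[0][key])
--         return return_key
--
--     searched_list.sort(key=lambda result:(sort_key(result)))
--     sorted_list = []
--     previous_result = None
--     for current_result in searched_list:
--         add_result = True
--         if previous_result is not None:
--             add_result = False
--             for key in key_list: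
--                 if current_result[0][key] != previous_result[0][key]:
--                     add_result = True
--                     break
--
--         if not add_result:
--             # update previous person's score in sorted_list
--             previous_result = sorted_list.pop()
--             updated_score = (previous_result[1][0] + current_result[1][0],
--                                                     previous_result[1][1] + current_result[1][1])
--             sorted_list.append((previous_result[0], updated_score))
--             # update previous_result
--             previous_result = (previous_result[0], updated_score)
--         else:
--             # add person and score to sorted_list
--             sorted_list.append(current_result)
--             # update previous_result
--             previous_result = current_result
--     # sort result by the updated scores
--     sorted_list.sort(key=(lambda tup: tup[1][1]), reverse=True)
--     return sorted_list
-- ===== SOURCE B (Python) =====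
-- def sort_list_by_score(searched_list, key_list):
--     """Returns list with accumulated scores for the same person from the fuzzy search between two fuzzy results"""
--
--     def key_values(result):
--         return [result[0][key] for key in key_list]
--
--     # sort in place (same observable mutation as the original)
--     searched_list.sort(key=key_values)
--
--     # merge each maximal run of equal composite keys in one two-pointer pass
--     merged = []
--     n = len(searched_list)
--     i = 0
--     while i < n:
--         record = searched_list[i][0]
--         score0, score1 = searched_list[i][1]
--         head = key_values(searched_list[i])
--         j = i + 1
--         while j < n and key_values(searched_list[j]) == head:
--             score0 += searched_list[j][1][0]
--             score1 += searched_list[j][1][1]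
--             j += 1
--         merged.append((record, (score0, score1)))
--         i = j
--
--     merged.sort(key=lambda tup: tup[1][1], reverse=True)
--     return merged
-- ===== Notes on version B (the rewrite author's own statement) =====
-- stated objective: simpler
-- what changed: Replaces A's previous-element comparison with pop-and-readd of the accumulator's last item by a two-pointer pass that consumes each maximal run of equal composite keys at once and appends one merged record per run.
import Mathlib
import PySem

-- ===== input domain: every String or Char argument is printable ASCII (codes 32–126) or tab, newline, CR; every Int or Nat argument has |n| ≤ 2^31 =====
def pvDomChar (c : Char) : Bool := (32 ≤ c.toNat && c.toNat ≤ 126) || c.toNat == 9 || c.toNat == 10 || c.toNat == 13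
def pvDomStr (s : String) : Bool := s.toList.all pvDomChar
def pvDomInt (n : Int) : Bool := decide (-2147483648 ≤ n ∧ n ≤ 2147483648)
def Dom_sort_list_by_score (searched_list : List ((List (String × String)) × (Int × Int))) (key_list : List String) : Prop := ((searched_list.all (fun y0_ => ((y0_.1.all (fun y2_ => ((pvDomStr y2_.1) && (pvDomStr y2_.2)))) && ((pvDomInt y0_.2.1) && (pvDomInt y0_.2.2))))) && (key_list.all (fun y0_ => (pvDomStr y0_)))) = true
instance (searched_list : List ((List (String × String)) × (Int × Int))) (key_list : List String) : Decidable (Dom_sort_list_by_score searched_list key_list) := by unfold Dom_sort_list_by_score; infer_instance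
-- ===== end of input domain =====

-- B replaces A's pop-and-readd adjacency merge by a two-pointer merge of maximal equal-key
-- runs (objective: simpler).  A mutates searched_list in place (sorts it); B performs the same
-- in-place sort; the equivalence proved here is about the RETURN value.

-- ===== PORT A =====
-- A's sort_key: builds the key list by an append loop.  result[0][key] is a dict lookup that
-- raises KeyError when absent; under Pre_ every key is present, so Dict.getD _ _ "" is exact.
def pvKeyA (key_list : List String) (result : (List (String × String)) × (Int × Int)) : List String :=
  key_list.foldl (fun acc k => acc ++ [PySem.Dict.getD (PySem.Dict.mk result.1) k ""]) []

-- one iteration of A's 'for current_result in searched_list' loop, state = (sorted_list, previous_result)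
def pvLoopA (key_list : List String)
    (st : List ((List (String × String)) × (Int × Int)) × Option ((List (String × String)) × (Int × Int)))
    (current : (List (String × String)) × (Int × Int)) :
    List ((List (String × String)) × (Int × Int)) × Option ((List (String × String)) × (Int × Int)) :=
  let add_result : Bool :=
    match st.2 with
    | none => true
    | some prev => key_list.any (fun k =>
        PySem.Dict.getD (PySem.Dict.mk current.1) k "" != PySem.Dict.getD (PySem.Dict.mk prev.1) k "")
  if add_result then
    (st.1 ++ [current], some current)
  else
    match st.1.getLast? with
    | none => st   -- unreachable (previous_result ≠ None ⇒ sorted_list nonempty); Python's .pop() would raise IndexError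
    | some prev =>
        let updated : Int × Int := (prev.2.1 + current.2.1, prev.2.2 + current.2.2)
        (st.1.dropLast ++ [(prev.1, updated)], some (prev.1, updated))

def sort_list_by_score (searched_list : List ((List (String × String)) × (Int × Int))) (key_list : List String) : List ((List (String × String)) × (Int × Int)) :=
  let s := PySem.List.sorted searched_list (fun r => pvKeyA key_list r) false
  let sorted_list := (s.foldl (pvLoopA key_list) ([], none)).1
  PySem.List.sorted sorted_list (fun tup => tup.2.2) true

-- ===== PORT B =====
-- B's key_values comprehension
def pvKeyB (key_list : List String) (result : (List (String × String)) × (Int × Int)) : List String :=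
  key_list.map (fun k => PySem.Dict.getD (PySem.Dict.mk result.1) k "")

-- B's outer while loop: each step consumes one maximal run of equal composite keys
-- (the inner 'while j < n and …' is the takeWhile/dropWhile split plus the score fold)
def pvMergeRuns (key_list : List String) :
    List ((List (String × String)) × (Int × Int)) → List ((List (String × String)) × (Int × Int))
  | [] => []
  | x :: rest =>
      let head := pvKeyB key_list x
      let run := rest.takeWhile (fun y => pvKeyB key_list y == head)
      let tail := rest.dropWhile (fun y => pvKeyB key_list y == head)
      let score := run.foldl (fun s y => (s.1 + y.2.1, s.2 + y.2.2)) x.2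
      (x.1, score) :: pvMergeRuns key_list tail
  termination_by l => l.length
  decreasing_by
    simp only [List.length_cons]
    exact Nat.lt_succ_of_le (List.length_dropWhile_le _ _)

def sort_list_by_score_alt (searched_list : List ((List (String × String)) × (Int × Int))) (key_list : List String) : List ((List (String × String)) × (Int × Int)) :=
  let s := PySem.List.sorted searched_list (pvKeyB key_list) false
  let merged := pvMergeRuns key_list s
  PySem.List.sorted merged (fun tup => tup.2.2) true

-- ===== PRECONDITION & SPEC =====
-- Pre_: every sort key occurs in every record's dict — otherwise Python A raises KeyError in sort_key.
def Pre_sort_list_by_score (searched_list : List ((List (String × String)) × (Int × Int))) (key_list : List String) : Prop :=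
  ∀ p ∈ searched_list, ∀ k ∈ key_list, k ∈ p.1.map Prod.fst
instance (searched_list : List ((List (String × String)) × (Int × Int))) (key_list : List String) : Decidable (Pre_sort_list_by_score searched_list key_list) := by unfold Pre_sort_list_by_score; infer_instance

def pvWitness_sort_list_by_score : (List ((List (String × String)) × (Int × Int))) × List String :=
  ([([("id", "1"), ("name", "ann")], (3, 4)), ([("id", "1"), ("name", "ann")], (1, 2))], ["id", "name"])

def Spec_sort_list_by_score (searched_list : List ((List (String × String)) × (Int × Int))) (key_list : List String) (out : List ((List (String × String)) × (Int × Int))) : Prop := out = sort_list_by_score_alt searched_list key_list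
instance (searched_list : List ((List (String × String)) × (Int × Int))) (key_list : List String) (out : List ((List (String × String)) × (Int × Int))) : Decidable (Spec_sort_list_by_score searched_list key_list out) := by unfold Spec_sort_list_by_score; infer_instance

-- ===== CLAIM (what is proved, stated in full; the proofs are below) =====
def Claim_equal_sort_list_by_score : Prop := ∀ (searched_list : List ((List (String × String)) × (Int × Int))) (key_list : List String), Dom_sort_list_by_score searched_list key_list → Pre_sort_list_by_score searched_list key_list → Spec_sort_list_by_score searched_list key_list (sort_list_by_score searched_list key_list)

-- ===== LEMMAS AND PROOFS =====

-- the two key functions agree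
theorem pvKeyA_eq_keyB (key_list : List String) (r : (List (String × String)) × (Int × Int)) :
    pvKeyA key_list r = pvKeyB key_list r := by
  unfold pvKeyA pvKeyB
  exact PySem.List.foldl_append_singleton_eq_map _ key_list []

-- A's inner any-of-≠ test is the negation of B's key-list equality test
theorem pvAny_ne_eq_false_iff (key_list : List String) (c p : (List (String × String)) × (Int × Int)) :
    (key_list.any (fun k =>
        PySem.Dict.getD (PySem.Dict.mk c.1) k "" != PySem.Dict.getD (PySem.Dict.mk p.1) k "")) = false
      ↔ pvKeyB key_list c = pvKeyB key_list p := by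
  unfold pvKeyB
  induction key_list with
  | nil => simp
  | cons k ks ih => simp [List.any_cons, ih]

-- the fold of A's loop over any tail equals B's run merge, given the run head as state
theorem pvLoopA_eq_mergeRuns (key_list : List String) (xs : List ((List (String × String)) × (Int × Int))) :
    ∀ (acc : List ((List (String × String)) × (Int × Int))) (rec : List (String × String)) (s : Int × Int),
    (xs.foldl (pvLoopA key_list) (acc ++ [(rec, s)], some (rec, s))).1
      = acc ++ pvMergeRuns key_list ((rec, s) :: xs) := by
  induction xs with
  | nil =>
    intro acc rec s
    simp [pvMergeRuns]
  | cons y ys ih =>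
    intro acc rec s
    rw [List.foldl_cons]
    by_cases h : pvKeyB key_list y = pvKeyB key_list (rec, s)
    · -- same composite key: merge into the last element
      have hany : (key_list.any (fun k =>
          PySem.Dict.getD (PySem.Dict.mk y.1) k "" != PySem.Dict.getD (PySem.Dict.mk (rec, s).1) k "")) = false :=
        (pvAny_ne_eq_false_iff key_list y (rec, s)).mpr h
      have hstep : pvLoopA key_list (acc ++ [(rec, s)], some (rec, s)) y
          = (acc ++ [(rec, (s.1 + y.2.1, s.2 + y.2.2))], some (rec, (s.1 + y.2.1, s.2 + y.2.2))) := by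
        simp [pvLoopA, hany]
      rw [hstep, ih acc rec (s.1 + y.2.1, s.2 + y.2.2)]
      -- absorbing y into the head state matches pvMergeRuns consuming y inside the run
      have hrw : pvMergeRuns key_list ((rec, s) :: y :: ys)
          = pvMergeRuns key_list ((rec, (s.1 + y.2.1, s.2 + y.2.2)) :: ys) := by
        rw [pvMergeRuns, pvMergeRuns]
        have hhd : pvKeyB key_list (rec, (s.1 + y.2.1, s.2 + y.2.2)) = pvKeyB key_list (rec, s) := rfl
        simp only [hhd]
        have hb : (pvKeyB key_list y == pvKeyB key_list (rec, s)) = true := by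
          simpa using h
        simp only [List.takeWhile_cons, List.dropWhile_cons, hb, if_true, List.foldl_cons]
      rw [hrw]
    · -- new composite key: append y and continue with y as run head
      have hany : (key_list.any (fun k =>
          PySem.Dict.getD (PySem.Dict.mk y.1) k "" != PySem.Dict.getD (PySem.Dict.mk (rec, s).1) k "")) = true := by
        cases hb : (key_list.any (fun k =>
            PySem.Dict.getD (PySem.Dict.mk y.1) k "" != PySem.Dict.getD (PySem.Dict.mk (rec, s).1) k "")) with
        | false => exact absurd ((pvAny_ne_eq_false_iff key_list y (rec, s)).mp hb) h
        | true => rfl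
      have hstep : pvLoopA key_list (acc ++ [(rec, s)], some (rec, s)) y
          = ((acc ++ [(rec, s)]) ++ [(y.1, y.2)], some (y.1, y.2)) := by
        simp [pvLoopA, hany]
      rw [hstep, ih (acc ++ [(rec, s)]) y.1 y.2]
      have hrw : pvMergeRuns key_list ((rec, s) :: y :: ys)
          = (rec, s) :: pvMergeRuns key_list (y :: ys) := by
        rw [pvMergeRuns]
        have hb : (pvKeyB key_list y == pvKeyB key_list (rec, s)) = false := by
          simpa using h
        simp [hb]
      rw [hrw]
      simp

-- the merge phases agree on any (in particular the sorted) list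
theorem pvFoldA_eq_mergeRuns (key_list : List String) (s : List ((List (String × String)) × (Int × Int))) :
    (s.foldl (pvLoopA key_list) ([], none)).1 = pvMergeRuns key_list s := by
  cases s with
  | nil => simp [pvMergeRuns]
  | cons c cs =>
    rw [List.foldl_cons]
    have hstep : pvLoopA key_list ([], none) c = ([] ++ [(c.1, c.2)], some (c.1, c.2)) := by
      simp [pvLoopA]
    rw [hstep, pvLoopA_eq_mergeRuns key_list cs [] c.1 c.2]
    simp

-- ===== VERDICT (by name: the statement is the Claim_ definition above) =====
theorem sort_list_by_score_spec : Claim_equal_sort_list_by_score := by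
  intro searched_list key_list _ _
  unfold Spec_sort_list_by_score sort_list_by_score sort_list_by_score_alt
  have hkey : (fun r => pvKeyA key_list r) = pvKeyB key_list := funext (pvKeyA_eq_keyB key_list)
  rw [hkey]
  simp only [pvFoldA_eq_mergeRuns]
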